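-- pv_equiv track=rewrite | github.com/jarikmarwede/IdeaBag2-Solutions | Numbers/Latin_Squares/latin_squares.py | _is_latin_square_vertically
-- ===== SOURCE A (Python) =====
-- def _is_latin_square_vertically(row_length: int, array: str) -> bool:
--     """Return whether array is a latin square just through vertical checking."""
--     for column in range(0, row_length):
--         numbers = []
--         for row in range(0, len(array) // row_length):
--             digit = array[row * row_length + column]
--             # check whether the digit is already in the current row
--             if digit in numbers:
--                 return False
--             numbers.append(digit)
--
--     return True
-- ===== SOURCE B (Python) =====
-- def _is_latin_square_vertically(row_length: int, array: str) -> bool: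
--     """Return whether array is a latin square just through vertical checking."""
--     if row_length <= 0:
--         return True
--     seen = set()
--     limit = len(array) // row_length * row_length
--     for i in range(limit):
--         key = (i % row_length, array[i])
--         if key in seen:
--             return False
--         seen.add(key)
--     return True
-- ===== Notes on version B (the rewrite author's own statement) =====
-- stated objective: alternative
-- what changed: Replaces A's nested column-by-column loops (each keeping a per-column list scanned for membership) by a single flat pass over the checked prefix of the string that records (column, char) keys in one set, where column = index % row_length.
import Mathlib
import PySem

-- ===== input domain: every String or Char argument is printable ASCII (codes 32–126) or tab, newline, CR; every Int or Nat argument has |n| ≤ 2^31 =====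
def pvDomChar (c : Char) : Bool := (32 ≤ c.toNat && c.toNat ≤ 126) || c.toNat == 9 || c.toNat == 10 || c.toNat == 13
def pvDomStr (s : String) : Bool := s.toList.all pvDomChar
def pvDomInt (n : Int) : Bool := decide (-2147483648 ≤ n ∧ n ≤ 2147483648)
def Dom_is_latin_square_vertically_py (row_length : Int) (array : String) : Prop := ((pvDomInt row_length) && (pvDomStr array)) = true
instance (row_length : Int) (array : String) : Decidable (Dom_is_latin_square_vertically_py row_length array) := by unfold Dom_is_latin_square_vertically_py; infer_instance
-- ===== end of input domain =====

-- B replaces A's nested column-by-column loops by ONE flat pass over the checked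
-- prefix with a single set of (column, char) keys (alternative decomposition).

-- ===== PORT A =====
-- inner loop 'for row in range(0, len(array)//row_length): …' with early return False;
-- the index row*row_length+column is always in range when the loop runs, so pyGetD's
-- default is never used (exact).
def pvInnerA (array : List Char) (rl c : Int) (rows : List Int) (numbers : List Char) : Bool :=
  match rows with
  | [] => true
  | r :: rs =>
    let digit := PySem.List.pyGetD array (r * rl + c) ' '
    if numbers.contains digit then false
    else pvInnerA array rl c rs (numbers ++ [digit])

-- outer loop 'for column in range(0, row_length): …'
def pvOuterA (array : List Char) (rl : Int) (cols : List Int) : Bool :=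
  match cols with
  | [] => true
  | c :: cs =>
    if pvInnerA array rl c
        (PySem.List.pyRange 0 (PySem.Int.floordiv (array.length : Int) rl) 1) [] then
      pvOuterA array rl cs
    else false

def is_latin_square_vertically_py (row_length : Int) (array : String) : Bool :=
  pvOuterA array.toList row_length (PySem.List.pyRange 0 row_length 1)

-- ===== PORT B =====
-- 'for i in range(limit): key = (i % row_length, array[i]); if key in seen: return False; seen.add(key)'
-- the index i is always in range (i < limit ≤ len), so pyGetD's default is never used (exact).
def pvScanB (array : List Char) (rl : Int) (idxs : List Int) (seen : PySem.Set (Int × Char)) : Bool :=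
  match idxs with
  | [] => true
  | i :: is =>
    let key : Int × Char := (PySem.Int.mod i rl, PySem.List.pyGetD array i ' ')
    if PySem.Set.contains seen key then false
    else pvScanB array rl is (PySem.Set.add seen key)

def is_latin_square_vertically_py_alt (row_length : Int) (array : String) : Bool :=
  if row_length ≤ 0 then true
  else
    pvScanB array.toList row_length
      (PySem.List.pyRange 0
        (PySem.Int.floordiv (array.toList.length : Int) row_length * row_length) 1)
      PySem.Set.empty

-- ===== PRECONDITION & SPEC =====
def Spec_is_latin_square_vertically_py (row_length : Int) (array : String) (out : Bool) : Prop := out = is_latin_square_vertically_py_alt row_length array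
instance (row_length : Int) (array : String) (out : Bool) : Decidable (Spec_is_latin_square_vertically_py row_length array out) := by unfold Spec_is_latin_square_vertically_py; infer_instance

-- ===== CLAIM (what is proved, stated in full; the proofs are below) =====
def Claim_equal_is_latin_square_vertically_py : Prop := ∀ (row_length : Int) (array : String), Dom_is_latin_square_vertically_py row_length array → Spec_is_latin_square_vertically_py row_length array (is_latin_square_vertically_py row_length array)

-- ===== LEMMAS AND PROOFS =====

-- A's inner duplicate scan decides Nodup of 'numbers ++ column so far'.
theorem pvInnerA_eq_nodup (array : List Char) (rl c : Int) (rows : List Int)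
    (numbers : List Char) (h : numbers.Nodup) :
    pvInnerA array rl c rows numbers =
      decide (numbers ++ rows.map (fun r => PySem.List.pyGetD array (r * rl + c) ' ')).Nodup := by
  induction rows generalizing numbers with
  | nil => simp [pvInnerA, h]
  | cons r rs ih =>
    simp only [pvInnerA, List.map_cons]
    by_cases hmem : PySem.List.pyGetD array (r * rl + c) ' ' ∈ numbers
    · have hnot : ¬ (numbers ++ PySem.List.pyGetD array (r * rl + c) ' '
          :: rs.map (fun r => PySem.List.pyGetD array (r * rl + c) ' ')).Nodup := by
        intro hnd
        rcases (List.nodup_append.mp hnd) with ⟨-, -, hdisj⟩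
        exact hdisj _ hmem _ (List.mem_cons_self) rfl
      simp [hmem, hnot]
    · have h' : (numbers ++ [PySem.List.pyGetD array (r * rl + c) ' ']).Nodup := by
        rw [List.nodup_append]
        refine ⟨h, List.nodup_singleton _, ?_⟩
        intro a ha b hb
        simp only [List.mem_singleton] at hb
        subst hb
        exact fun he => hmem (he ▸ ha)
      rw [ih _ h']
      simp [hmem, List.append_assoc]

-- B's flat scan decides Nodup of 'seen ++ keys of the remaining indices'.
theorem pvScanB_eq_nodup (array : List Char) (rl : Int) (idxs : List Int)
    (seen : PySem.Set (Int × Char)) (h : seen.Nodup) :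
    pvScanB array rl idxs seen =
      decide (seen ++ idxs.map
        (fun i => ((PySem.Int.mod i rl, PySem.List.pyGetD array i ' ') : Int × Char))).Nodup := by
  induction idxs generalizing seen with
  | nil => simp [pvScanB, h]
  | cons i is ih =>
    simp only [pvScanB, List.map_cons]
    by_cases hmem : ((PySem.Int.mod i rl, PySem.List.pyGetD array i ' ') : Int × Char) ∈ seen
    · have hc : PySem.Set.contains seen
          ((PySem.Int.mod i rl, PySem.List.pyGetD array i ' ') : Int × Char) = true :=
        (PySem.Set.contains_iff _ _).mpr hmem
      have hnot : ¬ (seen ++ ((PySem.Int.mod i rl, PySem.List.pyGetD array i ' ') : Int × Char)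
          :: is.map (fun i => ((PySem.Int.mod i rl, PySem.List.pyGetD array i ' ') : Int × Char))).Nodup := by
        intro hnd
        rcases (List.nodup_append.mp hnd) with ⟨-, -, hdisj⟩
        exact hdisj _ hmem _ (List.mem_cons_self) rfl
      rw [hc]
      simp [hnot]
    · have hc : PySem.Set.contains seen
          ((PySem.Int.mod i rl, PySem.List.pyGetD array i ' ') : Int × Char) = false := by
        cases hx : PySem.Set.contains seen
            ((PySem.Int.mod i rl, PySem.List.pyGetD array i ' ') : Int × Char) with
        | false => rfl
        | true => exact absurd ((PySem.Set.contains_iff _ _).mp hx) hmem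
      have hadd : PySem.Set.add seen ((PySem.Int.mod i rl, PySem.List.pyGetD array i ' ') : Int × Char)
          = seen ++ [((PySem.Int.mod i rl, PySem.List.pyGetD array i ' ') : Int × Char)] :=
        PySem.Set.add_of_not_mem hmem
      have h' : (seen ++ [((PySem.Int.mod i rl, PySem.List.pyGetD array i ' ') : Int × Char)]).Nodup := by
        rw [List.nodup_append]
        refine ⟨h, List.nodup_singleton _, ?_⟩
        intro a ha b hb
        simp only [List.mem_singleton] at hb
        subst hb
        exact fun he => hmem (he ▸ ha)
      rw [hc]
      simp only [hadd, ih _ h']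
      simp [hmem, List.append_assoc]

-- For i = r*rl + c with 0 ≤ c < rl, the key's column component is c.
theorem pv_mod_key (r c rl : Int) (hrl : 0 < rl) (hc0 : 0 ≤ c) (hc : c < rl) :
    PySem.Int.mod (r * rl + c) rl = c := by
  rw [PySem.Int.mod_eq_emod_of_pos hrl]
  have : (r * rl + c) % rl = c % rl := by
    rw [add_comm, mul_comm]
    exact Int.add_mul_emod_self_left c rl r
  rw [this, Int.emod_eq_of_lt hc0 hc]

-- The flat key list over the checked prefix is Nodup iff every column is Nodup.
theorem pv_keys_nodup_iff (array : List Char) (rl rows : Int) (hrl : 0 < rl) (hrows : 0 ≤ rows) :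
    ((PySem.List.pyRange 0 (rows * rl) 1).map
        (fun i => ((PySem.Int.mod i rl, PySem.List.pyGetD array i ' ') : Int × Char))).Nodup ↔
      ∀ c, 0 ≤ c → c < rl →
        ((PySem.List.pyRange 0 rows 1).map
          (fun r => PySem.List.pyGetD array (r * rl + c) ' ')).Nodup := by
  rw [List.nodup_map_iff_inj_on (PySem.List.nodup_pyRange_one _ _)]
  constructor
  · intro hinj c hc0 hc
    rw [List.nodup_map_iff_inj_on (PySem.List.nodup_pyRange_one _ _)]
    intro r1 hr1 r2 hr2 heq
    rw [PySem.List.mem_pyRange_one] at hr1 hr2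
    have hi1 : r1 * rl + c ∈ PySem.List.pyRange 0 (rows * rl) 1 := by
      rw [PySem.List.mem_pyRange_one]
      constructor
      · nlinarith [hr1.1]
      · nlinarith [hr1.2]
    have hi2 : r2 * rl + c ∈ PySem.List.pyRange 0 (rows * rl) 1 := by
      rw [PySem.List.mem_pyRange_one]
      constructor
      · nlinarith [hr2.1]
      · nlinarith [hr2.2]
    have := hinj _ hi1 _ hi2 (by
      rw [pv_mod_key _ _ _ hrl hc0 hc, pv_mod_key _ _ _ hrl hc0 hc, heq])
    have : r1 * rl = r2 * rl := by omega
    exact mul_right_cancel₀ (by omega) this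
  · intro hcols i hi j hj heq
    rw [PySem.List.mem_pyRange_one] at hi hj
    set c := PySem.Int.mod i rl with hcdef
    have hc0 : 0 ≤ c := PySem.Int.mod_nonneg i hrl
    have hc : c < rl := PySem.Int.mod_lt i hrl
    have hcj : PySem.Int.mod j rl = c := by
      have := congrArg Prod.fst heq
      simpa using this.symm
    have hvij : PySem.List.pyGetD array i ' ' = PySem.List.pyGetD array j ' ' := by
      have := congrArg Prod.snd heq
      simpa using this
    -- decompose i and j by rl
    have hmi : c = i % rl := by rw [hcdef, PySem.Int.mod_eq_emod_of_pos hrl]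
    have hmj : PySem.Int.mod j rl = j % rl := PySem.Int.mod_eq_emod_of_pos hrl
    have hdi : rl * (i / rl) + i % rl = i := Int.ediv_add_emod i rl
    have hdj : rl * (j / rl) + j % rl = j := Int.ediv_add_emod j rl
    have hri0 : 0 ≤ i / rl := Int.ediv_nonneg hi.1 (le_of_lt hrl)
    have hrj0 : 0 ≤ j / rl := Int.ediv_nonneg hj.1 (le_of_lt hrl)
    have hri : i / rl < rows := by
      by_contra hge
      push_neg at hge
      have h1 : rl * rows ≤ rl * (i / rl) := mul_le_mul_of_nonneg_left hge (le_of_lt hrl)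
      have h2 : 0 ≤ i % rl := Int.emod_nonneg i (by omega)
      nlinarith [hi.2]
    have hrj : j / rl < rows := by
      by_contra hge
      push_neg at hge
      have h1 : rl * rows ≤ rl * (j / rl) := mul_le_mul_of_nonneg_left hge (le_of_lt hrl)
      have h2 : 0 ≤ j % rl := Int.emod_nonneg j (by omega)
      nlinarith [hj.2]
    have hcol := hcols c hc0 hc
    rw [List.nodup_map_iff_inj_on (PySem.List.nodup_pyRange_one _ _)] at hcol
    have heqr : i / rl = j / rl := by
      refine hcol _ (by rw [PySem.List.mem_pyRange_one]; exact ⟨hri0, hri⟩)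
        _ (by rw [PySem.List.mem_pyRange_one]; exact ⟨hrj0, hrj⟩) ?_
      have hieq : i / rl * rl + c = i := by
        rw [hmi, Int.mul_comm (i / rl) rl]; omega
      have hjeq : j / rl * rl + c = j := by
        have hcj' : c = j % rl := by rw [← hcj, hmj]
        rw [hcj', Int.mul_comm (j / rl) rl]; omega
      rw [hieq, hjeq, hvij]
    have hieq : i = rl * (i / rl) + c := by rw [hmi]; omega
    have hjeq : j = rl * (j / rl) + c := by
      have hcj' : c = j % rl := by rw [← hcj, hmj]
      rw [hcj']; omega
    rw [hieq, hjeq, heqr]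

-- A's outer loop over columns [lo, rl) decides 'every column in that range is Nodup'.
theorem pvOuterA_eq_decide (a : List Char) (rl : Int)
    (rows : Int) (hrows : rows = PySem.Int.floordiv (a.length : Int) rl) (lo : Int) :
    pvOuterA a rl (PySem.List.pyRange lo rl 1) =
      decide (∀ c, lo ≤ c → c < rl →
        ((PySem.List.pyRange 0 rows 1).map
          (fun r => PySem.List.pyGetD a (r * rl + c) ' ')).Nodup) := by
  by_cases hle : rl ≤ lo
  · rw [PySem.List.pyRange_one_eq_nil hle]
    simp only [pvOuterA]
    have : ∀ c, lo ≤ c → c < rl →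
        ((PySem.List.pyRange 0 rows 1).map
          (fun r => PySem.List.pyGetD a (r * rl + c) ' ')).Nodup := by
      intro c h1 h2; omega
    exact (decide_eq_true this).symm
  · push_neg at hle
    have hterm : (rl - (lo + 1)).toNat < (rl - lo).toNat := by omega
    rw [PySem.List.pyRange_one_cons hle]
    simp only [pvOuterA]
    rw [pvInnerA_eq_nodup _ _ _ _ [] List.nodup_nil,
      pvOuterA_eq_decide a rl rows hrows (lo + 1)]
    simp only [List.nil_append, ← hrows]
    by_cases hlc : ((PySem.List.pyRange 0 rows 1).map
        (fun r => PySem.List.pyGetD a (r * rl + lo) ' ')).Nodup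
    · simp only [hlc, decide_true, if_true]
      rw [decide_eq_decide]
      constructor
      · intro h c h1 h2
        rcases eq_or_lt_of_le h1 with rfl | hlt
        · exact hlc
        · exact h c (by omega) h2
      · intro h c h1 h2; exact h c (by omega) h2
    · have : ¬ (∀ c, lo ≤ c → c < rl →
          ((PySem.List.pyRange 0 rows 1).map
            (fun r => PySem.List.pyGetD a (r * rl + c) ' ')).Nodup) := by
        intro h; exact hlc (h lo le_rfl hle)
      simp [hlc, this]
termination_by (rl - lo).toNat

-- ===== VERDICT (by name: the statement is the Claim_ definition above) =====
theorem is_latin_square_vertically_py_spec : Claim_equal_is_latin_square_vertically_py := by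
  intro rl array _
  unfold Spec_is_latin_square_vertically_py is_latin_square_vertically_py
    is_latin_square_vertically_py_alt
  by_cases hrl : rl ≤ 0
  · rw [if_pos hrl, PySem.List.pyRange_one_eq_nil hrl]
    rfl
  · rw [if_neg hrl]
    push_neg at hrl
    set a := array.toList
    set rows := PySem.Int.floordiv (a.length : Int) rl with hrows
    have hrows0 : 0 ≤ rows := by
      rw [hrows, PySem.Int.floordiv_eq_ediv_of_pos hrl]
      exact Int.ediv_nonneg (by positivity) (le_of_lt hrl)
    rw [show (PySem.Set.empty : PySem.Set (Int × Char)) = ([] : List (Int × Char)) from rfl,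
      pvScanB_eq_nodup _ _ _ _ List.nodup_nil,
      pvOuterA_eq_decide a rl rows hrows 0, decide_eq_decide]
    rw [List.nil_append, pv_keys_nodup_iff a rl rows hrl hrows0]
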